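-- pv_equiv track=rewrite | github.com/mdfahimshahriar17/Problem-Solving | find_highestMark_lowestMark_from_dict.py | find_highestMark_lowestMark
-- ===== SOURCE A (Python) =====
-- def find_highestMark_lowestMark(students):
--     highest_mark_std = {}
--     lowest_mark_std = {}
--
--     highest = 0
--     lowest = 0
--
--     for key, val in students.items():
--         highest = val
--         lowest = val
--
--         highest_mark_std.update({key : val})
--         lowest_mark_std.update({key : val})
--         break
--
--     for key, val in students.items():
--         if val > highest:
--             highest = val
--
--             highest_mark_std.clear()
--             highest_mark_std[key] = val
--
--         elif val < lowest:
--             lowest = val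
--
--             lowest_mark_std.clear()
--             lowest_mark_std[key] = val
--
--
--     return (highest_mark_std, lowest_mark_std)
-- ===== SOURCE B (Python) =====
-- def find_highestMark_lowestMark(students):
--     if not students:
--         return ({}, {})
--
--     def extremes(items):
--         # divide and conquer: extrema of items (nonempty) by halving;
--         # left-biased combine preserves first-achiever tie semantics
--         if len(items) == 1:
--             return items[0], items[0]
--         mid = len(items) // 2
--         h1, l1 = extremes(items[:mid])
--         h2, l2 = extremes(items[mid:])
--         h = h2 if h2[1] > h1[1] else h1
--         l = l2 if l2[1] < l1[1] else l1
--         return h, l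
--
--     (hk, hv), (lk, lv) = extremes(list(students.items()))
--     return ({hk: hv}, {lk: lv})
-- ===== Notes on version B (the rewrite author's own statement) =====
-- stated objective: alternative
-- what changed: Replaced A's seed-then-linear-scan accumulator loop with a divide-and-conquer tournament: recursively split the item list in half, compute each half's extrema, and combine with left-biased comparisons (which preserves A's first-achiever tie-breaking).
import Mathlib
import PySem

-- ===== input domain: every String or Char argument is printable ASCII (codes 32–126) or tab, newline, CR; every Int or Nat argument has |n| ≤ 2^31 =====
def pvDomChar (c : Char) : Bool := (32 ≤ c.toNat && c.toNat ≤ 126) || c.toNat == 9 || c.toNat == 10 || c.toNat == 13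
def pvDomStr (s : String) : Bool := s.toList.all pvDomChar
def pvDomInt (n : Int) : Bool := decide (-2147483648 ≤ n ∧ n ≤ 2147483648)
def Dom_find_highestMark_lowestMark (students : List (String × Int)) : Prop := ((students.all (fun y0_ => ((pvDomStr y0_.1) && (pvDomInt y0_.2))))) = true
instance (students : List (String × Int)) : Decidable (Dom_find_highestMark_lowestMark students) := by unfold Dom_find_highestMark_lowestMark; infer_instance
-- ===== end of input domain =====

-- B replaces A's seed-then-linear-scan accumulator loop with a divide-and-conquer
-- tournament over halves (alternative decomposition; same cost).

-- ===== PORT A =====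
-- one iteration of A's second loop over state (highest, lowest, highest_mark_std, lowest_mark_std)
def pvStepA (st : Int × Int × List (String × Int) × List (String × Int)) (kv : String × Int) :
    Int × Int × List (String × Int) × List (String × Int) :=
  if kv.2 > st.1 then (kv.2, st.2.1, [kv], st.2.2.2)
  else if kv.2 < st.2.1 then (st.1, kv.2, st.2.2.1, [kv])
  else st

def find_highestMark_lowestMark (students : List (String × Int)) : (List (String × Int)) × (List (String × Int)) :=
  -- first loop: runs at most once (break), seeding state from the first item
  let seed : Int × Int × List (String × Int) × List (String × Int) :=
    match students with
    | [] => (0, 0, [], [])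
    | kv :: _ => (kv.2, kv.2, [kv], [kv])
  -- second loop over all items
  let fin := students.foldl pvStepA seed
  (fin.2.2.1, fin.2.2.2)

-- ===== PORT B =====
-- Source B's `extremes`: divide-and-conquer extrema of a NONEMPTY list ([] is unreachable
-- in Source B, the Lean default value for [] is never used by the port's caller)
def pvExtremes (items : List (String × Int)) : (String × Int) × (String × Int) :=
  match items with
  | [] => (("", 0), ("", 0))
  | [kv] => (kv, kv)
  | a :: b :: rest =>
    let mid := (a :: b :: rest).length / 2
    let r1 := pvExtremes ((a :: b :: rest).take mid)
    let r2 := pvExtremes ((a :: b :: rest).drop mid)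
    ((if r2.1.2 > r1.1.2 then r2.1 else r1.1), (if r2.2.2 < r1.2.2 then r2.2 else r1.2))
termination_by items.length
decreasing_by
  · simp only [List.length_take, List.length_cons]; omega
  · simp only [List.length_drop, List.length_cons]; omega

def find_highestMark_lowestMark_alt (students : List (String × Int)) : (List (String × Int)) × (List (String × Int)) :=
  if students = [] then ([], [])
  else
    let r := pvExtremes students
    ([r.1], [r.2])

-- ===== PRECONDITION & SPEC =====
def Spec_find_highestMark_lowestMark (students : List (String × Int)) (out : (List (String × Int)) × (List (String × Int))) : Prop := out = find_highestMark_lowestMark_alt students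
instance (students : List (String × Int)) (out : (List (String × Int)) × (List (String × Int))) : Decidable (Spec_find_highestMark_lowestMark students out) := by unfold Spec_find_highestMark_lowestMark; infer_instance

-- ===== CLAIM (what is proved, stated in full; the proofs are below) =====
def Claim_equal_find_highestMark_lowestMark : Prop := ∀ (students : List (String × Int)), Dom_find_highestMark_lowestMark students → Spec_find_highestMark_lowestMark students (find_highestMark_lowestMark students)

-- ===== LEMMAS AND PROOFS =====

-- left-biased running extremum steps (the common yardstick both ports reduce to)
def pvMaxStep (m x : String × Int) : String × Int := if m.2 < x.2 then x else m
def pvMinStep (m x : String × Int) : String × Int := if x.2 < m.2 then x else m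

theorem pvMaxStep_assoc (a b c : String × Int) :
    pvMaxStep (pvMaxStep a b) c = pvMaxStep a (pvMaxStep b c) := by
  simp only [pvMaxStep]; split_ifs <;> first | rfl | omega

theorem pvMinStep_assoc (a b c : String × Int) :
    pvMinStep (pvMinStep a b) c = pvMinStep a (pvMinStep b c) := by
  simp only [pvMinStep]; split_ifs <;> first | rfl | omega

theorem foldl_maxStep_comb (t : List (String × Int)) :
    ∀ (a h : String × Int), List.foldl pvMaxStep a (h :: t) = pvMaxStep a (t.foldl pvMaxStep h) := by
  induction t with
  | nil => intro a h; rfl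
  | cons x t ih =>
      intro a h
      show List.foldl pvMaxStep (pvMaxStep a h) (x :: t) = _
      rw [ih (pvMaxStep a h) x, pvMaxStep_assoc, ← ih h x]

theorem foldl_minStep_comb (t : List (String × Int)) :
    ∀ (a h : String × Int), List.foldl pvMinStep a (h :: t) = pvMinStep a (t.foldl pvMinStep h) := by
  induction t with
  | nil => intro a h; rfl
  | cons x t ih =>
      intro a h
      show List.foldl pvMinStep (pvMinStep a h) (x :: t) = _
      rw [ih (pvMinStep a h) x, pvMinStep_assoc, ← ih h x]

-- the divide-and-conquer tournament computes exactly the left-biased running extrema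
theorem pvExtremes_eq (n : Nat) :
    ∀ (h : String × Int) (t : List (String × Int)), (h :: t).length ≤ n →
      pvExtremes (h :: t) = (t.foldl pvMaxStep h, t.foldl pvMinStep h) := by
  induction n with
  | zero => intro h t hle; simp at hle
  | succ n ih =>
      intro h t hle
      match t with
      | [] => rw [pvExtremes]; rfl
      | t1 :: t2 =>
        rw [pvExtremes]
        have hlen : (h :: t1 :: t2).length = t2.length + 2 := by simp
        set l := h :: t1 :: t2 with hl
        have hmid1 : 1 ≤ l.length / 2 := by rw [hlen]; omega
        have hmid2 : l.length / 2 < l.length := by rw [hlen]; omega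
        -- the two halves are nonempty
        obtain ⟨x, xs, hx⟩ : ∃ x xs, l.take (l.length / 2) = x :: xs := by
          cases htk : l.take (l.length / 2) with
          | nil => exfalso; have := congrArg List.length htk; simp at this; omega
          | cons x xs => exact ⟨x, xs, rfl⟩
        obtain ⟨y, ys, hy⟩ : ∃ y ys, l.drop (l.length / 2) = y :: ys := by
          cases hdr : l.drop (l.length / 2) with
          | nil => exfalso; have := congrArg List.length hdr; simp at this; omega
          | cons y ys => exact ⟨y, ys, rfl⟩
        have hxlen : (x :: xs).length ≤ n := by
          have := congrArg List.length hx; simp at this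
          simp only [List.length_cons] at hle ⊢; omega
        have hylen : (y :: ys).length ≤ n := by
          have := congrArg List.length hy; simp at this
          simp only [List.length_cons] at hle ⊢; omega
        rw [hx, hy, ih x xs hxlen, ih y ys hylen]
        -- reassemble: l = (x :: xs) ++ (y :: ys), and h = x
        have hsplit : l = (x :: xs) ++ (y :: ys) := by
          rw [← hx, ← hy, List.take_append_drop]
        have hxh : x = h ∧ xs ++ y :: ys = t1 :: t2 := by
          have := hsplit
          simp only [hl, List.cons_append] at this
          exact ⟨(List.cons.injEq .. ▸ this).1.symm, (List.cons.injEq .. ▸ this).2.symm⟩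
        obtain ⟨hxh1, hxh2⟩ := hxh
        subst hxh1
        have hmax : (t1 :: t2).foldl pvMaxStep x = pvMaxStep (xs.foldl pvMaxStep x) (ys.foldl pvMaxStep y) := by
          rw [← hxh2, List.foldl_append, foldl_maxStep_comb]
        have hmin : (t1 :: t2).foldl pvMinStep x = pvMinStep (xs.foldl pvMinStep x) (ys.foldl pvMinStep y) := by
          rw [← hxh2, List.foldl_append, foldl_minStep_comb]
        rw [hmax, hmin]
        simp only [pvMaxStep, pvMinStep]

-- A's combined loop splits into the two independent extremum folds
theorem pv_foldA (t : List (String × Int)) :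
    ∀ (hm lm : String × Int), lm.2 ≤ hm.2 →
      List.foldl pvStepA (hm.2, lm.2, [hm], [lm]) t
        = ((t.foldl pvMaxStep hm).2, (t.foldl pvMinStep lm).2,
           [t.foldl pvMaxStep hm], [t.foldl pvMinStep lm]) := by
  induction t with
  | nil => intro hm lm _; rfl
  | cons x t ih =>
      intro hm lm hle
      by_cases h1 : hm.2 < x.2
      · have e : pvStepA (hm.2, lm.2, [hm], [lm]) x = (x.2, lm.2, [x], [lm]) := by
          simp [pvStepA, h1]
        have emax : pvMaxStep hm x = x := by simp [pvMaxStep, h1]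
        have emin : pvMinStep lm x = lm := by simp [pvMinStep]; omega
        simp only [List.foldl_cons, e, emax, emin]
        exact ih x lm (by omega)
      · by_cases h2 : x.2 < lm.2
        · have e : pvStepA (hm.2, lm.2, [hm], [lm]) x = (hm.2, x.2, [hm], [x]) := by
            simp [pvStepA, h1, h2]
          have emax : pvMaxStep hm x = hm := by simp [pvMaxStep, h1]
          have emin : pvMinStep lm x = x := by simp [pvMinStep, h2]
          simp only [List.foldl_cons, e, emax, emin]
          exact ih hm x (by omega)
        · have e : pvStepA (hm.2, lm.2, [hm], [lm]) x = (hm.2, lm.2, [hm], [lm]) := by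
            simp [pvStepA, h1, h2]
          have emax : pvMaxStep hm x = hm := by simp [pvMaxStep, h1]
          have emin : pvMinStep lm x = lm := by simp [pvMinStep, h2]
          simp only [List.foldl_cons, e, emax, emin]
          exact ih hm lm hle

-- ===== VERDICT (by name: the statement is the Claim_ definition above) =====
theorem find_highestMark_lowestMark_spec : Claim_equal_find_highestMark_lowestMark := by
  intro students _
  unfold Spec_find_highestMark_lowestMark
  cases students with
  | nil => rfl
  | cons p rest =>
      unfold find_highestMark_lowestMark find_highestMark_lowestMark_alt
      have step0 : pvStepA (p.2, p.2, [p], [p]) p = (p.2, p.2, [p], [p]) := by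
        simp [pvStepA]
      simp only [List.foldl_cons, step0, pv_foldA rest p p le_rfl,
        pvExtremes_eq (p :: rest).length p rest le_rfl]
      simp
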